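-- pv_equiv track=rewrite | github.com/y-ann/aoc2023 | 1/v2.py | lfind_digit
-- ===== SOURCE A (Python) =====
-- from typing import Optional
--
-- DIGITS = {
--     "one": 1,
--     "two": 2,
--     "three": 3,
--     "four": 4,
--     "five": 5,
--     "six": 6,
--     "seven": 7,
--     "eight": 8,
--     "nine": 9,
-- }
--
-- def lfind_digit(input: str) -> Optional[int]:
--     digits = list(DIGITS.keys())
--     min_len = 3
--     max_len = 5
--     for i in range(min_len, max_len + 1):
--         substring = input[:i]
--         if substring in digits:
--             return DIGITS[substring]
--     return None
-- ===== SOURCE B (Python) =====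
-- DIGITS = {
--     "one": 1,
--     "two": 2,
--     "three": 3,
--     "four": 4,
--     "five": 5,
--     "six": 6,
--     "seven": 7,
--     "eight": 8,
--     "nine": 9,
-- }
--
-- def lfind_digit(input):
--     for word, value in DIGITS.items():
--         if input.startswith(word):
--             return value
--     return None
-- ===== Notes on version B (the rewrite author's own statement) =====
-- stated objective: idiomatic
-- what changed: B iterates over the dictionary items once and tests each word with startswith, instead of looping over prefix lengths 3-5, slicing, membership-testing a rebuilt key list and re-looking the slice up in the dict.
import Mathlib
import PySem

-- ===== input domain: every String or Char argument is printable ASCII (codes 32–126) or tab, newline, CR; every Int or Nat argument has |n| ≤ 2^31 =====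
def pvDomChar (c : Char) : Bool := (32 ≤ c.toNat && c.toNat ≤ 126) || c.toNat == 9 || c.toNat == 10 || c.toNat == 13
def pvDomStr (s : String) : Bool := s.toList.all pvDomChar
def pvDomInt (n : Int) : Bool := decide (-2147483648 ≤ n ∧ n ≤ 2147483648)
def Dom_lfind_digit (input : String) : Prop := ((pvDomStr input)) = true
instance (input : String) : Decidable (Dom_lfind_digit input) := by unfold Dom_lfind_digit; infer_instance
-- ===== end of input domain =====

-- B replaces A's loop over prefix lengths 3..5 (slice + membership in the rebuilt key list + dict lookup)
-- by a single loop over the dict items testing each word with startswith; objective: idiomatic, same cost.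

-- ===== PORT A =====
def pvDIGITS : PySem.Dict String Int :=
  PySem.Dict.ofList [("one", 1), ("two", 2), ("three", 3), ("four", 4), ("five", 5),
                     ("six", 6), ("seven", 7), ("eight", 8), ("nine", 9)]

def lfindLoopA (input : String) (digits : List String) : List Int → Option Int
  | [] => none
  | i :: rest =>
    let substring := PySem.Str.slice input none (some i)
    if substring ∈ digits then pvDIGITS.get? substring
    else lfindLoopA input digits rest

def lfind_digit (input : String) : Option Int :=
  let digits := pvDIGITS.keys
  let min_len : Int := 3
  let max_len : Int := 5
  lfindLoopA input digits (PySem.List.pyRange min_len (max_len + 1) 1)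

-- ===== PORT B =====
def lfindLoopB (input : String) : List (String × Int) → Option Int
  | [] => none
  | (word, value) :: rest =>
    if PySem.Str.startswith input word then some value
    else lfindLoopB input rest

def lfind_digit_alt (input : String) : Option Int :=
  lfindLoopB input pvDIGITS.items

-- ===== PRECONDITION & SPEC =====
def Spec_lfind_digit (input : String) (out : Option Int) : Prop := out = lfind_digit_alt input
instance (input : String) (out : Option Int) : Decidable (Spec_lfind_digit input out) := by unfold Spec_lfind_digit; infer_instance

-- ===== CLAIM (what is proved, stated in full; the proofs are below) =====
def Claim_equal_lfind_digit : Prop := ∀ (input : String), Dom_lfind_digit input → Spec_lfind_digit input (lfind_digit input)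

-- ===== LEMMAS AND PROOFS =====

-- A's result as a function of the character list (A's check order: prefix length 3, then 4, then 5).
def lfindF (l : List Char) : Option Int :=
  if l.take 3 = ['o', 'n', 'e'] then some 1
  else if l.take 3 = ['t', 'w', 'o'] then some 2
  else if l.take 3 = ['s', 'i', 'x'] then some 6
  else if l.take 4 = ['f', 'o', 'u', 'r'] then some 4
  else if l.take 4 = ['f', 'i', 'v', 'e'] then some 5
  else if l.take 4 = ['n', 'i', 'n', 'e'] then some 9
  else if l.take 5 = ['t', 'h', 'r', 'e', 'e'] then some 3
  else if l.take 5 = ['s', 'e', 'v', 'e', 'n'] then some 7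
  else if l.take 5 = ['e', 'i', 'g', 'h', 't'] then some 8
  else none

-- B's result as a function of the character list (dict order).
def lfindG (l : List Char) : Option Int :=
  if l.take 3 = ['o', 'n', 'e'] then some 1
  else if l.take 3 = ['t', 'w', 'o'] then some 2
  else if l.take 5 = ['t', 'h', 'r', 'e', 'e'] then some 3
  else if l.take 4 = ['f', 'o', 'u', 'r'] then some 4
  else if l.take 4 = ['f', 'i', 'v', 'e'] then some 5
  else if l.take 3 = ['s', 'i', 'x'] then some 6
  else if l.take 5 = ['s', 'e', 'v', 'e', 'n'] then some 7
  else if l.take 5 = ['e', 'i', 'g', 'h', 't'] then some 8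
  else if l.take 4 = ['n', 'i', 'n', 'e'] then some 9
  else none

lemma take_of_take_eq {l w : List Char} {m n : Nat} (hmn : m ≤ n) (hw : w.length ≤ m)
    (h : l.take n = w) : l.take m = w := by
  have h1 : l.take m = (l.take n).take m := by
    rw [List.take_take, Nat.min_eq_left hmn]
  rw [h1, h, List.take_of_length_le hw]

lemma take_conflict {l a b : List Char} {m n : Nat} (hmn : m ≤ n)
    (h1 : l.take m = a) (h2 : l.take n = b) : b.take m = a := by
  rw [← h2, List.take_take, Nat.min_eq_left hmn, h1]

lemma slice_eq_iff (input : String) (k : Nat) (w : String) :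
    PySem.Str.slice input none (some (k : Int)) = w ↔ input.toList.take k = w.toList := by
  constructor
  · intro h
    have := congrArg String.toList h
    simpa [PySem.List.slice_to_natCast] using this
  · intro h
    have h2 : (PySem.Str.slice input none (some (k : Int))).toList = w.toList := by
      simpa [PySem.List.slice_to_natCast] using h
    exact String.toList_injective h2

lemma startswith_eq_iff (input w : String) :
    PySem.Str.startswith input w = true ↔ input.toList.take w.toList.length = w.toList := by
  rw [PySem.Str.startswith_eq, PySem.Chars.startswith_iff, List.prefix_iff_eq_take]
  constructor <;> (intro h; exact h.symm)

lemma A_eq (input : String) : lfind_digit input = lfindF input.toList := by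
  have hrange : PySem.List.pyRange 3 (5 + 1) 1 = ([3, 4, 5] : List Int) := by decide
  have hkeys : pvDIGITS.keys =
      ["one", "two", "three", "four", "five", "six", "seven", "eight", "nine"] := by decide
  have p31 : PySem.Str.slice input none (some (3 : Int)) = "one" ↔ input.toList.take 3 = ['o', 'n', 'e'] := slice_eq_iff input 3 "one"
  have p32 : PySem.Str.slice input none (some (3 : Int)) = "two" ↔ input.toList.take 3 = ['t', 'w', 'o'] := slice_eq_iff input 3 "two"
  have p3t : PySem.Str.slice input none (some (3 : Int)) = "three" ↔ input.toList.take 3 = ['t', 'h', 'r', 'e', 'e'] := slice_eq_iff input 3 "three"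
  have p34 : PySem.Str.slice input none (some (3 : Int)) = "four" ↔ input.toList.take 3 = ['f', 'o', 'u', 'r'] := slice_eq_iff input 3 "four"
  have p35 : PySem.Str.slice input none (some (3 : Int)) = "five" ↔ input.toList.take 3 = ['f', 'i', 'v', 'e'] := slice_eq_iff input 3 "five"
  have p36 : PySem.Str.slice input none (some (3 : Int)) = "six" ↔ input.toList.take 3 = ['s', 'i', 'x'] := slice_eq_iff input 3 "six"
  have p3s : PySem.Str.slice input none (some (3 : Int)) = "seven" ↔ input.toList.take 3 = ['s', 'e', 'v', 'e', 'n'] := slice_eq_iff input 3 "seven"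
  have p3e : PySem.Str.slice input none (some (3 : Int)) = "eight" ↔ input.toList.take 3 = ['e', 'i', 'g', 'h', 't'] := slice_eq_iff input 3 "eight"
  have p39 : PySem.Str.slice input none (some (3 : Int)) = "nine" ↔ input.toList.take 3 = ['n', 'i', 'n', 'e'] := slice_eq_iff input 3 "nine"
  have p41 : PySem.Str.slice input none (some (4 : Int)) = "one" ↔ input.toList.take 4 = ['o', 'n', 'e'] := slice_eq_iff input 4 "one"
  have p42 : PySem.Str.slice input none (some (4 : Int)) = "two" ↔ input.toList.take 4 = ['t', 'w', 'o'] := slice_eq_iff input 4 "two"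
  have p4t : PySem.Str.slice input none (some (4 : Int)) = "three" ↔ input.toList.take 4 = ['t', 'h', 'r', 'e', 'e'] := slice_eq_iff input 4 "three"
  have p44 : PySem.Str.slice input none (some (4 : Int)) = "four" ↔ input.toList.take 4 = ['f', 'o', 'u', 'r'] := slice_eq_iff input 4 "four"
  have p45 : PySem.Str.slice input none (some (4 : Int)) = "five" ↔ input.toList.take 4 = ['f', 'i', 'v', 'e'] := slice_eq_iff input 4 "five"
  have p46 : PySem.Str.slice input none (some (4 : Int)) = "six" ↔ input.toList.take 4 = ['s', 'i', 'x'] := slice_eq_iff input 4 "six"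
  have p4s : PySem.Str.slice input none (some (4 : Int)) = "seven" ↔ input.toList.take 4 = ['s', 'e', 'v', 'e', 'n'] := slice_eq_iff input 4 "seven"
  have p4e : PySem.Str.slice input none (some (4 : Int)) = "eight" ↔ input.toList.take 4 = ['e', 'i', 'g', 'h', 't'] := slice_eq_iff input 4 "eight"
  have p49 : PySem.Str.slice input none (some (4 : Int)) = "nine" ↔ input.toList.take 4 = ['n', 'i', 'n', 'e'] := slice_eq_iff input 4 "nine"
  have p51 : PySem.Str.slice input none (some (5 : Int)) = "one" ↔ input.toList.take 5 = ['o', 'n', 'e'] := slice_eq_iff input 5 "one"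
  have p52 : PySem.Str.slice input none (some (5 : Int)) = "two" ↔ input.toList.take 5 = ['t', 'w', 'o'] := slice_eq_iff input 5 "two"
  have p5t : PySem.Str.slice input none (some (5 : Int)) = "three" ↔ input.toList.take 5 = ['t', 'h', 'r', 'e', 'e'] := slice_eq_iff input 5 "three"
  have p54 : PySem.Str.slice input none (some (5 : Int)) = "four" ↔ input.toList.take 5 = ['f', 'o', 'u', 'r'] := slice_eq_iff input 5 "four"
  have p55 : PySem.Str.slice input none (some (5 : Int)) = "five" ↔ input.toList.take 5 = ['f', 'i', 'v', 'e'] := slice_eq_iff input 5 "five"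
  have p56 : PySem.Str.slice input none (some (5 : Int)) = "six" ↔ input.toList.take 5 = ['s', 'i', 'x'] := slice_eq_iff input 5 "six"
  have p5s : PySem.Str.slice input none (some (5 : Int)) = "seven" ↔ input.toList.take 5 = ['s', 'e', 'v', 'e', 'n'] := slice_eq_iff input 5 "seven"
  have p5e : PySem.Str.slice input none (some (5 : Int)) = "eight" ↔ input.toList.take 5 = ['e', 'i', 'g', 'h', 't'] := slice_eq_iff input 5 "eight"
  have p59 : PySem.Str.slice input none (some (5 : Int)) = "nine" ↔ input.toList.take 5 = ['n', 'i', 'n', 'e'] := slice_eq_iff input 5 "nine"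
  simp only [lfind_digit, hrange, hkeys, lfindLoopA, List.mem_cons, List.not_mem_nil, or_false]
  simp only [p31, p32, p3t, p34, p35, p36, p3s, p3e, p39, p41, p42, p4t, p44, p45, p46, p4s, p4e, p49, p51, p52, p5t, p54, p55, p56, p5s, p5e, p59]
  have n3t : input.toList.take 3 ≠ ['t', 'h', 'r', 'e', 'e'] := fun hx => by have := congrArg List.length hx; simp at this; omega
  have n34 : input.toList.take 3 ≠ ['f', 'o', 'u', 'r'] := fun hx => by have := congrArg List.length hx; simp at this; omega
  have n35 : input.toList.take 3 ≠ ['f', 'i', 'v', 'e'] := fun hx => by have := congrArg List.length hx; simp at this; omega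
  have n3s : input.toList.take 3 ≠ ['s', 'e', 'v', 'e', 'n'] := fun hx => by have := congrArg List.length hx; simp at this; omega
  have n3e : input.toList.take 3 ≠ ['e', 'i', 'g', 'h', 't'] := fun hx => by have := congrArg List.length hx; simp at this; omega
  have n39 : input.toList.take 3 ≠ ['n', 'i', 'n', 'e'] := fun hx => by have := congrArg List.length hx; simp at this; omega
  by_cases h1 : input.toList.take 3 = ['o', 'n', 'e']
  · have hq : PySem.Str.slice input none (some (3 : Int)) = "one" := p31.2 h1
    simp [lfindF, hq, n3t, n34, n35, n3s, n3e, n39, h1, show pvDIGITS.get? "one" = some 1 from by decide]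
  by_cases h2 : input.toList.take 3 = ['t', 'w', 'o']
  · have hq : PySem.Str.slice input none (some (3 : Int)) = "two" := p32.2 h2
    simp [lfindF, hq, n3t, n34, n35, n3s, n3e, n39, h1, h2, show pvDIGITS.get? "two" = some 2 from by decide]
  by_cases h6 : input.toList.take 3 = ['s', 'i', 'x']
  · have hq : PySem.Str.slice input none (some (3 : Int)) = "six" := p36.2 h6
    simp [lfindF, hq, n3t, n34, n35, n3s, n3e, n39, h1, h2, h6, show pvDIGITS.get? "six" = some 6 from by decide]
  have n41 : input.toList.take 4 ≠ ['o', 'n', 'e'] := fun hx => h1 (take_of_take_eq (by omega) (by decide) hx)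
  have n42 : input.toList.take 4 ≠ ['t', 'w', 'o'] := fun hx => h2 (take_of_take_eq (by omega) (by decide) hx)
  have n4t : input.toList.take 4 ≠ ['t', 'h', 'r', 'e', 'e'] := fun hx => by have := congrArg List.length hx; simp at this; omega
  have n46 : input.toList.take 4 ≠ ['s', 'i', 'x'] := fun hx => h6 (take_of_take_eq (by omega) (by decide) hx)
  have n4s : input.toList.take 4 ≠ ['s', 'e', 'v', 'e', 'n'] := fun hx => by have := congrArg List.length hx; simp at this; omega
  have n4e : input.toList.take 4 ≠ ['e', 'i', 'g', 'h', 't'] := fun hx => by have := congrArg List.length hx; simp at this; omega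
  by_cases h4 : input.toList.take 4 = ['f', 'o', 'u', 'r']
  · have hq : PySem.Str.slice input none (some (4 : Int)) = "four" := p44.2 h4
    simp [lfindF, hq, n3t, n34, n35, n3s, n3e, n39, h1, h2, h6, n41, n42, n4t, n46, n4s, n4e, h4, show pvDIGITS.get? "four" = some 4 from by decide]
  by_cases h5 : input.toList.take 4 = ['f', 'i', 'v', 'e']
  · have hq : PySem.Str.slice input none (some (4 : Int)) = "five" := p45.2 h5
    simp [lfindF, hq, n3t, n34, n35, n3s, n3e, n39, h1, h2, h6, n41, n42, n4t, n46, n4s, n4e, h4, h5, show pvDIGITS.get? "five" = some 5 from by decide]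
  by_cases h9 : input.toList.take 4 = ['n', 'i', 'n', 'e']
  · have hq : PySem.Str.slice input none (some (4 : Int)) = "nine" := p49.2 h9
    simp [lfindF, hq, n3t, n34, n35, n3s, n3e, n39, h1, h2, h6, n41, n42, n4t, n46, n4s, n4e, h4, h5, h9, show pvDIGITS.get? "nine" = some 9 from by decide]
  have n51 : input.toList.take 5 ≠ ['o', 'n', 'e'] := fun hx => h1 (take_of_take_eq (by omega) (by decide) hx)
  have n52 : input.toList.take 5 ≠ ['t', 'w', 'o'] := fun hx => h2 (take_of_take_eq (by omega) (by decide) hx)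
  have n54 : input.toList.take 5 ≠ ['f', 'o', 'u', 'r'] := fun hx => h4 (take_of_take_eq (by omega) (by decide) hx)
  have n55 : input.toList.take 5 ≠ ['f', 'i', 'v', 'e'] := fun hx => h5 (take_of_take_eq (by omega) (by decide) hx)
  have n56 : input.toList.take 5 ≠ ['s', 'i', 'x'] := fun hx => h6 (take_of_take_eq (by omega) (by decide) hx)
  have n59 : input.toList.take 5 ≠ ['n', 'i', 'n', 'e'] := fun hx => h9 (take_of_take_eq (by omega) (by decide) hx)
  by_cases ht : input.toList.take 5 = ['t', 'h', 'r', 'e', 'e']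
  · have hq : PySem.Str.slice input none (some (5 : Int)) = "three" := p5t.2 ht
    simp [lfindF, hq, n3t, n34, n35, n3s, n3e, n39, h1, h2, h6, n41, n42, n4t, n46, n4s, n4e, h4, h5, h9, n51, n52, n54, n55, n56, n59, ht, show pvDIGITS.get? "three" = some 3 from by decide]
  by_cases hs : input.toList.take 5 = ['s', 'e', 'v', 'e', 'n']
  · have hq : PySem.Str.slice input none (some (5 : Int)) = "seven" := p5s.2 hs
    simp [lfindF, hq, n3t, n34, n35, n3s, n3e, n39, h1, h2, h6, n41, n42, n4t, n46, n4s, n4e, h4, h5, h9, n51, n52, n54, n55, n56, n59, ht, hs, show pvDIGITS.get? "seven" = some 7 from by decide]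
  by_cases he : input.toList.take 5 = ['e', 'i', 'g', 'h', 't']
  · have hq : PySem.Str.slice input none (some (5 : Int)) = "eight" := p5e.2 he
    simp [lfindF, hq, n3t, n34, n35, n3s, n3e, n39, h1, h2, h6, n41, n42, n4t, n46, n4s, n4e, h4, h5, h9, n51, n52, n54, n55, n56, n59, ht, hs, he, show pvDIGITS.get? "eight" = some 8 from by decide]
  simp [lfindF, n3t, n34, n35, n3s, n3e, n39, h1, h2, h6, n41, n42, n4t, n46, n4s, n4e, h4, h5, h9, n51, n52, n54, n55, n56, n59, ht, hs, he]

lemma B_eq (input : String) : lfind_digit_alt input = lfindG input.toList := by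
  have hitems : pvDIGITS.items = [("one", 1), ("two", 2), ("three", 3), ("four", 4), ("five", 5),
      ("six", 6), ("seven", 7), ("eight", 8), ("nine", 9)] := by decide
  have s1 : PySem.Str.startswith input "one" = true ↔ input.toList.take 3 = ['o', 'n', 'e'] := startswith_eq_iff input "one"
  have s2 : PySem.Str.startswith input "two" = true ↔ input.toList.take 3 = ['t', 'w', 'o'] := startswith_eq_iff input "two"
  have st : PySem.Str.startswith input "three" = true ↔ input.toList.take 5 = ['t', 'h', 'r', 'e', 'e'] := startswith_eq_iff input "three"
  have s4 : PySem.Str.startswith input "four" = true ↔ input.toList.take 4 = ['f', 'o', 'u', 'r'] := startswith_eq_iff input "four"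
  have s5 : PySem.Str.startswith input "five" = true ↔ input.toList.take 4 = ['f', 'i', 'v', 'e'] := startswith_eq_iff input "five"
  have s6 : PySem.Str.startswith input "six" = true ↔ input.toList.take 3 = ['s', 'i', 'x'] := startswith_eq_iff input "six"
  have ss : PySem.Str.startswith input "seven" = true ↔ input.toList.take 5 = ['s', 'e', 'v', 'e', 'n'] := startswith_eq_iff input "seven"
  have se : PySem.Str.startswith input "eight" = true ↔ input.toList.take 5 = ['e', 'i', 'g', 'h', 't'] := startswith_eq_iff input "eight"
  have s9 : PySem.Str.startswith input "nine" = true ↔ input.toList.take 4 = ['n', 'i', 'n', 'e'] := startswith_eq_iff input "nine"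
  simp only [lfind_digit_alt, hitems, lfindLoopB]
  simp only [s1, s2, st, s4, s5, s6, ss, se, s9]
  rfl

lemma FG (l : List Char) : lfindF l = lfindG l := by
  by_cases h1 : l.take 3 = ['o', 'n', 'e']
  · -- one
    simp [lfindF, lfindG, h1]
  by_cases h2 : l.take 3 = ['t', 'w', 'o']
  · -- two
    simp [lfindF, lfindG, h1, h2]
  by_cases h6 : l.take 3 = ['s', 'i', 'x']
  · -- six
    have mt : l.take 5 ≠ ['t', 'h', 'r', 'e', 'e'] := fun hx => absurd (take_conflict (by omega) h6 hx) (by decide)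
    have m4 : l.take 4 ≠ ['f', 'o', 'u', 'r'] := fun hx => absurd (take_conflict (by omega) h6 hx) (by decide)
    have m5 : l.take 4 ≠ ['f', 'i', 'v', 'e'] := fun hx => absurd (take_conflict (by omega) h6 hx) (by decide)
    simp [lfindF, lfindG, h1, h2, h6, mt, m4, m5]
  by_cases h4 : l.take 4 = ['f', 'o', 'u', 'r']
  · -- four
    have mt : l.take 5 ≠ ['t', 'h', 'r', 'e', 'e'] := fun hx => absurd (take_conflict (by omega) h4 hx) (by decide)
    simp [lfindF, lfindG, h1, h2, h6, h4, mt]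
  by_cases h5 : l.take 4 = ['f', 'i', 'v', 'e']
  · -- five
    have mt : l.take 5 ≠ ['t', 'h', 'r', 'e', 'e'] := fun hx => absurd (take_conflict (by omega) h5 hx) (by decide)
    simp [lfindF, lfindG, h1, h2, h6, h4, h5, mt]
  by_cases h9 : l.take 4 = ['n', 'i', 'n', 'e']
  · -- nine
    have mt : l.take 5 ≠ ['t', 'h', 'r', 'e', 'e'] := fun hx => absurd (take_conflict (by omega) h9 hx) (by decide)
    have ms : l.take 5 ≠ ['s', 'e', 'v', 'e', 'n'] := fun hx => absurd (take_conflict (by omega) h9 hx) (by decide)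
    have me : l.take 5 ≠ ['e', 'i', 'g', 'h', 't'] := fun hx => absurd (take_conflict (by omega) h9 hx) (by decide)
    simp [lfindF, lfindG, h1, h2, h6, h4, h5, h9, mt, ms, me]
  by_cases ht : l.take 5 = ['t', 'h', 'r', 'e', 'e']
  · -- three
    simp [lfindF, lfindG, h1, h2, h6, h4, h5, h9, ht]
  by_cases hs : l.take 5 = ['s', 'e', 'v', 'e', 'n']
  · -- seven
    simp [lfindF, lfindG, h1, h2, h6, h4, h5, h9, ht, hs]
  by_cases he : l.take 5 = ['e', 'i', 'g', 'h', 't']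
  · -- eight
    simp [lfindF, lfindG, h1, h2, h6, h4, h5, h9, ht, hs, he]
  simp [lfindF, lfindG, h1, h2, h6, h4, h5, h9, ht, hs, he]

-- ===== VERDICT (by name: the statement is the Claim_ definition above) =====
theorem lfind_digit_spec : Claim_equal_lfind_digit := by
  intro input _
  unfold Spec_lfind_digit
  rw [A_eq, B_eq, FG]
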